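-- pv_equiv track=rewrite | github.com/Archangel4148/Classwork | CS5402/Homework 4/HW4-student.py | _get_indices_to_convolve
-- ===== SOURCE A (Python) =====
-- def _get_indices_to_convolve(img_dim, kernel_dim):
--     """Get indices to apply the kernel (with stride 1, 2, 1, 2, ...)"""
--     indices = []
--     current = 0
--     step_count = 0
--
--     # Find all indices to apply the kernel
--     while current + kernel_dim <= img_dim:
--         indices.append(current)
--         stride = 1 if step_count % 2 == 0 else 2  # Alternate stride
--         current += stride
--         step_count += 1
--     return indices
-- ===== SOURCE B (Python) =====
-- def _get_indices_to_convolve(img_dim, kernel_dim):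
--     """Closed form: the stride-1,2 walk visits exactly the n with n % 3 != 2."""
--     return [n for n in range(img_dim - kernel_dim + 1) if n % 3 != 2]
-- ===== Notes on version B (the rewrite author's own statement) =====
-- stated objective: simpler
-- what changed: Replaces the stateful alternating-stride while loop (current, step_count, stride branch) with a one-line closed-form filter: the visited indices are exactly the n in range(img_dim - kernel_dim + 1) with n % 3 != 2.
import Mathlib
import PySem

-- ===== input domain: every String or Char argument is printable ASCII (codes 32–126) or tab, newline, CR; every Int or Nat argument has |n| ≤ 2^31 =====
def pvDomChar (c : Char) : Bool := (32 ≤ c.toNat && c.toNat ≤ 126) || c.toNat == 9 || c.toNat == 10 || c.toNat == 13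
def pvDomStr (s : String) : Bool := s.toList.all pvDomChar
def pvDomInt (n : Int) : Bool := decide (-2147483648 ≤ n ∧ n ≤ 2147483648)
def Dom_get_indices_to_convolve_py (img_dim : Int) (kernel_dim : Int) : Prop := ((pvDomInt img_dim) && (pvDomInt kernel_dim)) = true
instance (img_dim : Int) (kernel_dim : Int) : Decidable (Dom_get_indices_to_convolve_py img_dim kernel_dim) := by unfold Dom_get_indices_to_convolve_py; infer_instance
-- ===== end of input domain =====

-- B replaces A's stateful alternating-stride while loop with a closed-form filter (objective: simpler).

-- ===== PORT A =====
-- the while loop of A, with state (current, step_count); indices are emitted in order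
def pvLoopA (img_dim kernel_dim current step_count : Int) : List Int :=
  if h : current + kernel_dim ≤ img_dim then
    current ::
      pvLoopA img_dim kernel_dim
        (current + (if PySem.Int.mod step_count 2 = 0 then 1 else 2))
        (step_count + 1)
  else []
termination_by (img_dim - kernel_dim - current + 1).toNat
decreasing_by
  split
  · exact (Int.toNat_lt_toNat (show (0:Int) < img_dim - kernel_dim - current + 1 by omega)).mpr (by omega)
  · exact (Int.toNat_lt_toNat (show (0:Int) < img_dim - kernel_dim - current + 1 by omega)).mpr (by omega)

def get_indices_to_convolve_py (img_dim : Int) (kernel_dim : Int) : List Int :=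
  pvLoopA img_dim kernel_dim 0 0

-- ===== PORT B =====
def get_indices_to_convolve_py_alt (img_dim : Int) (kernel_dim : Int) : List Int :=
  (PySem.List.pyRange 0 (img_dim - kernel_dim + 1) 1).filter
    (fun n => PySem.Int.mod n 3 ≠ 2)

-- ===== PRECONDITION & SPEC =====
def Spec_get_indices_to_convolve_py (img_dim : Int) (kernel_dim : Int) (out : List Int) : Prop := out = get_indices_to_convolve_py_alt img_dim kernel_dim
instance (img_dim : Int) (kernel_dim : Int) (out : List Int) : Decidable (Spec_get_indices_to_convolve_py img_dim kernel_dim out) := by unfold Spec_get_indices_to_convolve_py; infer_instance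

-- ===== CLAIM (what is proved, stated in full; the proofs are below) =====
def Claim_equal_get_indices_to_convolve_py : Prop := ∀ (img_dim : Int) (kernel_dim : Int), Dom_get_indices_to_convolve_py img_dim kernel_dim → Spec_get_indices_to_convolve_py img_dim kernel_dim (get_indices_to_convolve_py img_dim kernel_dim)

-- ===== LEMMAS AND PROOFS =====

-- Loop invariant: on reachable states, step_count is even iff current ≡ 0 (mod 3)
-- (and odd iff current ≡ 1), and A's remaining loop output is B's filter of the
-- remaining range.
lemma pvLoopA_eq (img_dim kernel_dim : Int) :
    ∀ (n : Nat) (c s : Int), 0 ≤ c → 0 ≤ s →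
      ((s % 2 = 0 ∧ c % 3 = 0) ∨ (s % 2 = 1 ∧ c % 3 = 1)) →
      n = (img_dim - kernel_dim + 1 - c).toNat →
      pvLoopA img_dim kernel_dim c s =
        (PySem.List.pyRange c (img_dim - kernel_dim + 1) 1).filter
          (fun x => PySem.Int.mod x 3 ≠ 2) := by
  intro n
  induction n using Nat.strong_induction_on with
  | _ n ih =>
    intro c s hc hs hinv hn
    rw [pvLoopA]
    split
    · rename_i hle
      -- range is nonempty: c < img_dim - kernel_dim + 1
      rw [PySem.List.pyRange_one_cons (by omega)]
      have hmodc : PySem.Int.mod c 3 = c % 3 := PySem.Int.mod_eq_emod_of_pos (by norm_num)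
      have hmods : PySem.Int.mod s 2 = s % 2 := PySem.Int.mod_eq_emod_of_pos (by norm_num)
      rw [List.filter_cons]
      have hkeep : (decide (PySem.Int.mod c 3 ≠ 2)) = true := by
        rw [hmodc]; rcases hinv with ⟨_, hc3⟩ | ⟨_, hc3⟩ <;> simp <;> omega
      rw [hkeep]
      simp only [List.cons.injEq, true_and, if_true]
      rcases hinv with ⟨hse, hc3⟩ | ⟨hso, hc3⟩
      · -- stride 1: next state (c+1, s+1), s+1 odd, (c+1) % 3 = 1
        rw [hmods, if_pos hse]
        exact ih (img_dim - kernel_dim + 1 - (c + 1)).toNat (by omega) (c + 1) (s + 1)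
          (by omega) (by omega) (Or.inr ⟨by omega, by omega⟩) rfl
      · -- stride 2: next state (c+2, s+1); c+1 ≡ 2 (mod 3) is filtered out of the range
        rw [hmods, if_neg (by omega)]
        by_cases hlt : c + 1 < img_dim - kernel_dim + 1
        · rw [PySem.List.pyRange_one_cons hlt, List.filter_cons]
          have hm1 : PySem.Int.mod (c + 1) 3 = (c + 1) % 3 := PySem.Int.mod_eq_emod_of_pos (by norm_num)
          have hdrop : (decide (PySem.Int.mod (c + 1) 3 ≠ 2)) = false := by
            rw [hm1]; simp; omega
          rw [hdrop]
          have : c + 1 + 1 = c + 2 := by ring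
          rw [this]
          exact ih (img_dim - kernel_dim + 1 - (c + 2)).toNat (by omega) (c + 2) (s + 1)
            (by omega) (by omega) (Or.inl ⟨by omega, by omega⟩) rfl
        · rw [PySem.List.pyRange_one_eq_nil (by omega), List.filter_nil]
          rw [pvLoopA.eq_def]
          split
          · omega
          · rfl
    · rename_i hgt
      rw [PySem.List.pyRange_one_eq_nil (by omega), List.filter_nil]

-- ===== VERDICT (by name: the statement is the Claim_ definition above) =====
theorem get_indices_to_convolve_py_spec : Claim_equal_get_indices_to_convolve_py := by
  intro img_dim kernel_dim _
  unfold Spec_get_indices_to_convolve_py get_indices_to_convolve_py get_indices_to_convolve_py_alt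
  exact pvLoopA_eq img_dim kernel_dim _ 0 0 le_rfl le_rfl (Or.inl ⟨rfl, rfl⟩) rfl
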